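-- pv_equiv track=rewrite | github.com/Stay-Lifted/Wordle-Tas-Tool | wordtasmodule.py | generate_guess
-- ===== SOURCE A (Python) =====
-- def generate_guess(candidates: dict) -> list:
--     usage_values = list(candidates.values())
--     usage_values.sort(reverse = True)
--     top_values = usage_values[0:5]
--     guesses = []
--     best_guesses = []
--
--     for word in candidates:
--         for value in top_values:
--             if candidates[word] == value:
--                 guesses.append(word)
--
--     for word in guesses:
--         if word not in best_guesses:
--             best_guesses.append(word)
--
--     return best_guesses
-- ===== SOURCE B (Python) =====
-- def generate_guess(candidates: dict) -> list:
--     # One bounded-selection pass finds the 5th-largest value as a cutoff,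
--     # then a single inequality filter keeps the qualifying words in order.
--     top = []  # descending list of (at most) the 5 largest values seen so far
--     for v in candidates.values():
--         if len(top) < 5 or v > top[-1]:
--             i = 0
--             while i < len(top) and top[i] >= v:
--                 i += 1
--             top.insert(i, v)
--             del top[5:]
--     if not top:
--         return []
--     cutoff = top[-1]
--     return [w for w, v in candidates.items() if v >= cutoff]
-- ===== Notes on version B (the rewrite author's own statement) =====
-- stated objective: faster
-- what changed: Replaces the full descending sort, the nested word-by-top-value equality scan and the dedup pass with a single bounded-selection pass that maintains the 5 largest values, takes their minimum as a scalar cutoff, and keeps the words in one inequality-filter pass.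
import Mathlib
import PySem

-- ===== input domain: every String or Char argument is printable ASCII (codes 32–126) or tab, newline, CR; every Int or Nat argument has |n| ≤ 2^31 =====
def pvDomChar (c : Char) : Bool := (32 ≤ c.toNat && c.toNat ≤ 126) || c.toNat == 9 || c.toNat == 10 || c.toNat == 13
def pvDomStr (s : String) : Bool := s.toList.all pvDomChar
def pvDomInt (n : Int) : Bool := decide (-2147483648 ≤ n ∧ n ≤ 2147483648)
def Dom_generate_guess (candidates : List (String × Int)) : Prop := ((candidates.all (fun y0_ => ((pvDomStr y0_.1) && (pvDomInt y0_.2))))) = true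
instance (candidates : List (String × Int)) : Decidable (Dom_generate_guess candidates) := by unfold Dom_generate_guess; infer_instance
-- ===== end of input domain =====

-- B replaces A's full sort + nested top-value equality scan + dedup pass by a bounded
-- selection of the 5 largest values and a single inequality filter (objective: faster).

-- ===== PORT A =====
def generate_guess (candidates : List (String × Int)) : List String :=
  let d := PySem.Dict.ofList candidates
  let usage_values := d.values
  let usage_values := PySem.List.sorted usage_values (fun v => v) true
  let top_values := PySem.List.slice usage_values (some 0) (some 5)
  let guesses := d.keys.foldl (fun g word =>
    -- candidates[word]: word ∈ d.keys, so the lookup cannot raise; getD's default is never used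
    top_values.foldl (fun g value => if d.getD word 0 == value then g ++ [word] else g) g) []
  guesses.foldl (fun b w => if w ∈ b then b else b ++ [w]) []

-- ===== PORT B =====
-- the Python while-loop insertion of v into the descending list t (stop at first element < v)
def insertDesc (v : Int) : List Int → List Int
  | [] => [v]
  | x :: xs => if v ≤ x then x :: insertDesc v xs else v :: x :: xs

def generate_guess_alt (candidates : List (String × Int)) : List String :=
  let d := PySem.Dict.ofList candidates
  let top := d.values.foldl (fun t v =>
    if t.length < 5 || (match t.getLast? with | some m => decide (m < v) | none => false)
    then (insertDesc v t).take 5 else t) []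
  match top.getLast? with
  | none => []
  | some cutoff => (d.items.filter (fun p => decide (cutoff ≤ p.2))).map (fun p => p.1)

-- ===== PRECONDITION & SPEC =====
def Spec_generate_guess (candidates : List (String × Int)) (out : List String) : Prop := out = generate_guess_alt candidates
instance (candidates : List (String × Int)) (out : List String) : Decidable (Spec_generate_guess candidates out) := by unfold Spec_generate_guess; infer_instance

-- ===== CLAIM (what is proved, stated in full; the proofs are below) =====
def Claim_equal_generate_guess : Prop := ∀ (candidates : List (String × Int)), Dom_generate_guess candidates → Spec_generate_guess candidates (generate_guess candidates)

-- ===== LEMMAS AND PROOFS =====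

theorem insertDesc_eq_insertBy (v : Int) (t : List Int) :
    PySem.List.insertBy (fun a b : Int => decide (b < a)) v t = insertDesc v t := by
  induction t with
  | nil => rfl
  | cons x xs ih =>
    simp only [PySem.List.insertBy, insertDesc]
    rcases le_or_gt v x with h | h
    · rw [if_neg (by simpa using not_lt.mpr h), if_pos h, ih]
    · rw [if_pos (by simpa using h), if_neg (not_le.mpr h)]

theorem take_insertDesc (k : Nat) (v : Int) (t : List Int) :
    ((insertDesc v t).take k) = (insertDesc v (t.take k)).take k := by
  induction t generalizing k with
  | nil => simp
  | cons x xs ih =>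
    cases k with
    | zero => simp
    | succ k =>
      simp only [insertDesc, List.take_succ_cons]
      split_ifs with h
      · simp only [List.take_succ_cons, ih k]
      · simp only [List.take_succ_cons]
        cases k with
        | zero => simp
        | succ j => rw [List.take_succ_cons, List.take_succ_cons, List.take_take, min_eq_left (by omega)]

theorem insertDesc_append (v : Int) (t : List Int) (h : ∀ x ∈ t, v ≤ x) :
    insertDesc v t = t ++ [v] := by
  induction t with
  | nil => rfl
  | cons x xs ih =>
    simp only [insertDesc, if_pos (h x (by simp))]
    rw [ih (fun y hy => h y (by simp [hy]))]
    rfl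

theorem getLast_le_of_pairwise (t : List Int) (ht : t.Pairwise (fun a b => b ≤ a))
    (h : t ≠ []) : ∀ x ∈ t, t.getLast h ≤ x := by
  intro x hx
  rw [List.pairwise_iff_getElem] at ht
  rw [List.mem_iff_getElem] at hx
  obtain ⟨i, hi, rfl⟩ := hx
  rw [List.getLast_eq_getElem]
  rcases eq_or_lt_of_le (Nat.le_sub_one_of_lt hi) with he | hlt
  · simp [he]
  · exact ht i (t.length - 1) hi (by omega) hlt

theorem top_eq_take_sorted (l : List Int) :
    l.foldl (fun t v =>
      if t.length < 5 || (match t.getLast? with | some m => decide (m < v) | none => false)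
      then (insertDesc v t).take 5 else t) []
    = (PySem.List.sorted l (fun v => v) true).take 5 := by
  induction l using List.reverseRecOn with
  | nil => rfl
  | append_singleton l v ih =>
    rw [List.foldl_append, List.foldl_cons, List.foldl_nil, ih]
    have hsor : PySem.List.sorted (l ++ [v]) (fun v => v) true
        = PySem.List.insertBy (fun a b : Int => decide (b < a)) v
            (PySem.List.sorted l (fun v => v) true) := by
      rw [PySem.List.sorted_rev_eq_foldl_insertBy, PySem.List.sorted_rev_eq_foldl_insertBy,
        List.foldl_append, List.foldl_cons, List.foldl_nil]
    rw [hsor, insertDesc_eq_insertBy]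
    set D := PySem.List.sorted l (fun v => v) true with hD
    by_cases hg : ((D.take 5).length < 5 || (match (D.take 5).getLast? with | some m => decide (m < v) | none => false)) = true
    · rw [if_pos hg, ← take_insertDesc]
    · rw [if_neg hg]
      simp only [Bool.or_eq_true, not_or, decide_eq_true_eq] at hg
      obtain ⟨hlen, hlast⟩ := hg
      have hlen5 : (D.take 5).length = 5 := by
        have := List.length_take_le 5 D
        omega
      have hne : D.take 5 ≠ [] := by
        intro h; rw [h] at hlen5; simp at hlen5
      have hm : (D.take 5).getLast? = some ((D.take 5).getLast hne) := List.getLast?_eq_some_getLast hne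
      rw [hm] at hlast
      have hvm : v ≤ (D.take 5).getLast hne := by
        simp only [decide_eq_true_eq] at hlast
        omega
      have hpw : (D.take 5).Pairwise (fun a b => b ≤ a) :=
        (PySem.List.sorted_pairwise_rev l (fun v => v)).sublist (List.take_sublist 5 D)
      rw [take_insertDesc, insertDesc_append v _ (fun x hx => le_trans hvm (getLast_le_of_pairwise _ hpw hne x hx))]
      rw [List.take_append_of_le_length (by omega)]
      exact (List.take_of_length_le (by omega)).symm

theorem mem_take_iff_cutoff (l : List Int) (v : Int) (hv : v ∈ l)
    (h : ((PySem.List.sorted l (fun v => v) true).take 5) ≠ []) :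
    v ∈ (PySem.List.sorted l (fun v => v) true).take 5 ↔
      ((PySem.List.sorted l (fun v => v) true).take 5).getLast h ≤ v := by
  set D := PySem.List.sorted l (fun v => v) true with hD
  have hpwD : D.Pairwise (fun a b => b ≤ a) := PySem.List.sorted_pairwise_rev l (fun v => v)
  have hpw : (D.take 5).Pairwise (fun a b => b ≤ a) := hpwD.sublist (List.take_sublist 5 D)
  constructor
  · intro hmem
    exact getLast_le_of_pairwise _ hpw h v hmem
  · intro hle
    have hvD : v ∈ D := by rw [hD, PySem.List.mem_sorted]; exact hv
    rw [← List.take_append_drop 5 D, List.mem_append] at hvD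
    rcases hvD with hmem | hmem
    · exact hmem
    · have hcross : ∀ a ∈ D.take 5, ∀ b ∈ D.drop 5, b ≤ a := by
        have := hpwD
        rw [← List.take_append_drop 5 D, List.pairwise_append] at this
        exact this.2.2
      have : v ≤ (D.take 5).getLast h :=
        hcross _ (List.getLast_mem h) v hmem
      have hveq : v = (D.take 5).getLast h := le_antisymm this hle
      rw [hveq]
      exact List.getLast_mem h

theorem dedup_fold_mem (c : List String) (b : List String) (h : ∀ x ∈ c, x ∈ b) :
    c.foldl (fun b w => if w ∈ b then b else b ++ [w]) b = b := by
  induction c with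
  | nil => rfl
  | cons x rest ih =>
    rw [List.foldl_cons, if_pos (h x (by simp))]
    exact ih (fun y hy => h y (by simp [hy]))

theorem dedup_fold_const (w : String) (c : List String) (hc : ∀ x ∈ c, x = w)
    (b : List String) (hw : w ∉ b) :
    c.foldl (fun b w => if w ∈ b then b else b ++ [w]) b = if c.isEmpty then b else b ++ [w] := by
  cases c with
  | nil => rfl
  | cons x rest =>
    have hx : x = w := hc x (by simp)
    subst hx
    rw [List.foldl_cons, if_neg hw]
    simp only [List.isEmpty_cons, if_neg Bool.false_ne_true]
    exact dedup_fold_mem rest _ (fun y hy => by simp [hc y (by simp [hy])])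

theorem dedup_flatMap (keys : List String) (F : String → List String)
    (hF : ∀ w, ∀ x ∈ F w, x = w) (hnd : keys.Nodup) :
    ∀ b : List String, (∀ w ∈ keys, w ∉ b) →
    (keys.flatMap F).foldl (fun b w => if w ∈ b then b else b ++ [w]) b
      = b ++ keys.filter (fun w => !(F w).isEmpty) := by
  induction keys with
  | nil => simp
  | cons w ks ih =>
    intro b hb
    rw [List.flatMap_cons, List.foldl_append,
      dedup_fold_const w (F w) (hF w) b (hb w (by simp))]
    rw [List.filter_cons]
    cases he : (F w).isEmpty with
    | true =>
      simp only [Bool.not_true, Bool.false_eq_true, if_false, if_true]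
      exact ih hnd.of_cons b (fun y hy => hb y (by simp [hy]))
    | false =>
      simp only [Bool.not_false, Bool.false_eq_true, if_false, if_true]
      rw [ih hnd.of_cons (b ++ [w])
        (fun y hy => by
          simp only [List.mem_append, List.mem_singleton, not_or]
          exact ⟨hb y (by simp [hy]), fun h => (List.nodup_cons.mp hnd).1 (h ▸ hy)⟩)]
      simp

theorem main_eq (candidates : List (String × Int)) :
    generate_guess candidates = generate_guess_alt candidates := by
  simp only [generate_guess, generate_guess_alt]
  set d := PySem.Dict.ofList candidates with hd
  have hnd : d.keys.Nodup := by rw [hd]; exact PySem.Dict.nodup_keys_ofList candidates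
  set D := PySem.List.sorted d.values (fun v => v) true with hD
  have hslice : PySem.List.slice D (some 0) (some 5) = D.take 5 := by
    rw [PySem.List.slice_zero_start, PySem.List.slice_to D (by norm_num)]
    rfl
  rw [hslice, top_eq_take_sorted, ← hD]
  simp only [PySem.List.foldl_append_if, PySem.List.foldl_append_eq_flatMap, List.nil_append]
  rw [dedup_flatMap d.keys _ (fun w x hx => by
        rcases List.mem_map.mp hx with ⟨a, _, rfl⟩; rfl) hnd [] (by simp)]
  simp only [List.nil_append]
  cases hT : (List.take 5 D).getLast? with
  | none =>
    have hTnil : List.take 5 D = [] := List.getLast?_eq_none_iff.mp hT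
    have hDnil : D = [] := by
      cases hDe : D with
      | nil => rfl
      | cons x xs => rw [hDe] at hTnil; simp at hTnil
    have hvals : d.values = [] := by
      have := hD
      rw [hDnil] at this
      exact (PySem.List.sorted_eq_nil_iff _ _ _).mp this.symm
    have hkeys : d.keys = [] := by
      have h1 : d.items.map (fun p => p.2) = [] := hvals
      have h2 : d.items = [] := by
        cases hi : d.items with
        | nil => rfl
        | cons p ps => rw [hi] at h1; simp at h1
      show d.items.map (fun p => p.1) = []
      rw [h2]; rfl
    rw [hkeys]
    rfl
  | some cutoff =>
    have hne : List.take 5 D ≠ [] := by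
      intro h; rw [h] at hT; simp at hT
    have hcut : cutoff = (List.take 5 D).getLast hne := by
      rw [List.getLast?_eq_some_getLast hne] at hT
      exact (Option.some.injEq _ _ ▸ hT.symm : _)
    show _ = List.map (fun p : String × Int => p.1) (List.filter (fun p => decide (cutoff ≤ p.2)) d.items)
    rw [PySem.Dict.items_eq_map_keys d hnd 0, List.filter_map, List.map_map]
    have hcomp : ((fun p : String × Int => p.1) ∘ fun k => (k, d.getD k 0)) = id := rfl
    rw [hcomp, List.map_id]
    apply List.filter_congr
    intro w hw
    have hv : d.getD w 0 ∈ d.values := by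
      rw [PySem.Dict.values_eq_map_keys d hnd 0]
      exact List.mem_map_of_mem hw
    have hmem := mem_take_iff_cutoff d.values (d.getD w 0) hv (hD ▸ hne)
    rw [Bool.eq_iff_iff]
    simp only [Function.comp_apply, Bool.not_eq_true', List.isEmpty_eq_false_iff, decide_eq_true_eq, List.isEmpty_map]
    constructor
    · intro hne2
      rcases List.exists_mem_of_ne_nil _ hne2 with ⟨a, ha⟩
      rcases List.mem_filter.mp ha with ⟨haT, hbeq⟩
      have : d.getD w 0 = a := by simpa using hbeq
      subst this
      rw [hcut]
      exact (hmem.mp (by exact hD ▸ haT))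
    · intro hle
      have : d.getD w 0 ∈ List.take 5 D := hD ▸ hmem.mpr (hcut ▸ hle)
      intro hfil
      rw [List.filter_eq_nil_iff] at hfil
      exact hfil _ this (by simp)

-- ===== VERDICT (by name: the statement is the Claim_ definition above) =====
theorem generate_guess_spec : Claim_equal_generate_guess := by
  intro candidates _
  exact main_eq candidates
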